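-- pv_equiv track=rewrite | github.com/melodist/CodingPractice | src/KAKAO/2018_BLIND_Auto Completion.py | solution
-- ===== SOURCE A (Python) =====
-- from collections import defaultdict
--
-- def solution(words):
--     answer = 0
--
--     cter = defaultdict(int)
--     for word in words:
--         temp = ''
--         for c in word:
--             temp += c
--             cter[temp] += 1
--
--     for word in words:
--         temp = ''
--         for c in word:
--             answer += 1
--             temp += c
--             if cter[temp] == 1:
--                 break
--
--     return answer
-- ===== SOURCE B (Python) =====
-- def solution(words):
--     total = 0
--     for i, w in enumerate(words):
--         best = 0
--         for j, v in enumerate(words):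
--             if j != i:
--                 best = max(best, _lcp(w, v))
--         total += min(len(w), best + 1)
--     return total
--
-- def _lcp(a, b):
--     k = 0
--     for x, y in zip(a, b):
--         if x != y:
--             break
--         k += 1
--     return k
-- ===== Notes on version B (the rewrite author's own statement) =====
-- stated objective: alternative
-- what changed: replaces the global prefix-occurrence counter dictionary and per-word counter walk by a direct pairwise computation: each word's keystrokes are min(len(w), 1 + max longest-common-prefix with any other word)
import Mathlib
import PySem

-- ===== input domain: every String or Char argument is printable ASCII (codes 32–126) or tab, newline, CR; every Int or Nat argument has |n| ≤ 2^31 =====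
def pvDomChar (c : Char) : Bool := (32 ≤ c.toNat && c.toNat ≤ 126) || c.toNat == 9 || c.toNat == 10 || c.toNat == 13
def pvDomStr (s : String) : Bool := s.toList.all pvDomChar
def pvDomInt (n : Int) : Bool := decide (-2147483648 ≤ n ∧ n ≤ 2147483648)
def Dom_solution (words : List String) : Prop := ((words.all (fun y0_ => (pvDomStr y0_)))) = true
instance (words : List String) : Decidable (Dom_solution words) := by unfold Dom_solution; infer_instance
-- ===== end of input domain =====

-- B replaces A's global prefix-occurrence dictionary by a direct pairwise longest-common-prefix
-- computation (alternative algorithm, similar cost; equivalence of the return values is proved below).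

-- ===== PORT A =====
-- inner loop body of A's first pass: temp += c; cter[temp] += 1
def bumpPrefix (p : PySem.Dict (List Char) Int × List Char) (c : Char) :
    PySem.Dict (List Char) Int × List Char :=
  let temp := p.2 ++ [c]
  (p.1.insert temp (p.1.getD temp 0 + 1), temp)

-- A's first pass, one word: for c in word: temp += c; cter[temp] += 1
def buildCounter (cter : PySem.Dict (List Char) Int) (word : String) :
    PySem.Dict (List Char) Int :=
  (word.toList.foldl bumpPrefix (cter, [])).1

-- A's second pass, one word (with the early break)
def typeLoop (cter : PySem.Dict (List Char) Int) (temp : List Char) (answer : Int) :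
    List Char → Int
  | [] => answer
  | c :: cs =>
    let answer' := answer + 1
    let temp' := temp ++ [c]
    if cter.getD temp' 0 = 1 then answer' else typeLoop cter temp' answer' cs

def solution (words : List String) : Int :=
  let cter := words.foldl buildCounter PySem.Dict.empty
  words.foldl (fun answer word => typeLoop cter [] answer word.toList) 0

-- ===== PORT B =====
-- _lcp: walk the zipped pair, stop at the first mismatch
def lcpI : List Char → List Char → Int
  | x :: xs, y :: ys => if x ≠ y then 0 else lcpI xs ys + 1
  | _, _ => 0

def solution_alt (words : List String) : Int :=
  words.zipIdx.foldl
    (fun total iw =>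
      let best := words.zipIdx.foldl
        (fun best jv => if jv.2 ≠ iw.2 then max best (lcpI iw.1.toList jv.1.toList) else best)
        0
      total + min (PySem.Str.len iw.1) (best + 1))
    0

-- ===== PRECONDITION & SPEC =====
def Spec_solution (words : List String) (out : Int) : Prop := out = solution_alt words
instance (words : List String) (out : Int) : Decidable (Spec_solution words out) := by unfold Spec_solution; infer_instance

-- ===== CLAIM (what is proved, stated in full; the proofs are below) =====
def Claim_equal_solution : Prop := ∀ (words : List String), Dom_solution words → Spec_solution words (solution words)

-- ===== LEMMAS AND PROOFS =====

-- Nat version of lcpI (proof-side)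
def lcpN : List Char → List Char → Nat
  | x :: xs, y :: ys => if x = y then lcpN xs ys + 1 else 0
  | _, _ => 0

theorem lcpI_eq (a b : List Char) : lcpI a b = (lcpN a b : Int) := by
  induction a generalizing b with
  | nil => cases b <;> simp [lcpI, lcpN]
  | cons x xs ih =>
    cases b with
    | nil => simp [lcpI, lcpN]
    | cons y ys => by_cases h : x = y <;> simp [lcpI, lcpN, h, ih]

-- Nat version of typeLoop's keystroke count (proof-side)
def steps (cter : PySem.Dict (List Char) Int) (temp : List Char) : List Char → Nat
  | [] => 0
  | c :: cs => if cter.getD (temp ++ [c]) 0 = 1 then 1 else 1 + steps cter (temp ++ [c]) cs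

theorem typeLoop_eq_steps (cter : PySem.Dict (List Char) Int) :
    ∀ (cs t : List Char) (a : Int), typeLoop cter t a cs = a + (steps cter t cs : Int) := by
  intro cs
  induction cs with
  | nil => intro t a; simp [typeLoop, steps]
  | cons c cs ih =>
    intro t a
    by_cases h : cter.getD (t ++ [c]) 0 = 1 <;> simp [typeLoop, steps, h, ih] <;> omega

-- the stream of nonempty prefixes of t ++ cs that strictly extend t
def prefsFrom (t : List Char) : List Char → List (List Char)
  | [] => []
  | c :: cs => (t ++ [c]) :: prefsFrom (t ++ [c]) cs

theorem prefsFrom_eq_map : ∀ (cs t : List Char),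
    prefsFrom t cs = (List.range cs.length).map (fun k => t ++ cs.take (k + 1)) := by
  intro cs
  induction cs with
  | nil => intro t; simp [prefsFrom]
  | cons c cs ih =>
    intro t
    rw [prefsFrom, ih (t ++ [c])]
    simp only [List.length_cons, List.range_succ_eq_map, List.map_cons, List.map_map]
    rw [List.cons_eq_cons]
    refine ⟨by simp, ?_⟩
    apply List.map_congr_left
    intro k _
    simp [Function.comp, List.take_succ_cons, List.append_assoc]

theorem mem_prefsFrom (cs p : List Char) :
    p ∈ prefsFrom [] cs ↔ (p ≠ [] ∧ p <+: cs) := by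
  rw [prefsFrom_eq_map]
  simp only [List.mem_map, List.mem_range, List.nil_append]
  constructor
  · rintro ⟨k, hk, rfl⟩
    constructor
    · have : (cs.take (k + 1)).length = k + 1 := by
        rw [List.length_take]; omega
      intro hnil; rw [hnil] at this; simp at this
    · exact List.take_prefix _ _
  · rintro ⟨hne, hpre⟩
    have hlen : p.length ≤ cs.length := hpre.length_le
    have hpos : 1 ≤ p.length := by
      cases p with
      | nil => simp at hne
      | cons a as => simp
    refine ⟨p.length - 1, by omega, ?_⟩
    rw [show p.length - 1 + 1 = p.length from by omega]
    exact (List.prefix_iff_eq_take.mp hpre).symm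

theorem nodup_prefsFrom (cs t : List Char) : (prefsFrom t cs).Nodup := by
  rw [prefsFrom_eq_map]
  apply List.Nodup.map_on _ (List.nodup_range)
  intro a ha b hb hab
  simp only [List.mem_range] at ha hb
  have la : (t ++ cs.take (a + 1)).length = t.length + (a + 1) := by
    simp [List.length_take]; omega
  have lb : (t ++ cs.take (b + 1)).length = t.length + (b + 1) := by
    simp [List.length_take]; omega
  have := congrArg List.length hab
  rw [la, lb] at this
  omega

theorem count_prefsFrom (cs p : List Char) :
    (prefsFrom [] cs).count p = if p ≠ [] ∧ p <+: cs then 1 else 0 := by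
  by_cases h : p ≠ [] ∧ p <+: cs
  · rw [if_pos h]
    exact List.count_eq_one_of_mem (nodup_prefsFrom cs []) ((mem_prefsFrom cs p).mpr h)
  · rw [if_neg h]
    exact List.count_eq_zero.mpr (fun hm => h ((mem_prefsFrom cs p).mp hm))

theorem buildCounter_eq (word : String) (d : PySem.Dict (List Char) Int) :
    buildCounter d word =
      (prefsFrom [] word.toList).foldl (fun d x => d.insert x (d.getD x 0 + 1)) d := by
  unfold buildCounter
  suffices h : ∀ (cs : List Char) (d : PySem.Dict (List Char) Int) (t : List Char),
      cs.foldl bumpPrefix (d, t) =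
        ((prefsFrom t cs).foldl (fun d x => d.insert x (d.getD x 0 + 1)) d, t ++ cs) by
    rw [h word.toList d []]
  intro cs
  induction cs with
  | nil => intro d t; simp [prefsFrom]
  | cons c cs ih =>
    intro d t
    simp only [List.foldl_cons, prefsFrom]
    rw [show bumpPrefix (d, t) c = (d.insert (t ++ [c]) (d.getD (t ++ [c]) 0 + 1), t ++ [c]) from rfl]
    rw [ih]
    simp

-- the counter's value at a key p is the number of words having p as a nonempty prefix
theorem cter_getD (p : List Char) : ∀ (ws : List String) (d : PySem.Dict (List Char) Int),
    (ws.foldl buildCounter d).getD p 0 =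
      d.getD p 0 + (ws.countP (fun v => decide (p ≠ [] ∧ p <+: v.toList)) : Int) := by
  intro ws
  induction ws with
  | nil => intro d; simp
  | cons w ws ih =>
    intro d
    simp only [List.foldl_cons, List.countP_cons]
    rw [ih, buildCounter_eq, PySem.Dict.getD_foldl_insert_add_one, count_prefsFrom]
    by_cases h : p ≠ [] ∧ p <+: w.toList <;> simp [h] <;> omega

-- take k a is a prefix of b iff the common prefix of a and b has length ≥ k (k ≤ |a|)
theorem take_prefix_iff_lcpN : ∀ (a b : List Char) (k : Nat), k ≤ a.length →
    (a.take k <+: b ↔ k ≤ lcpN a b) := by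
  intro a
  induction a with
  | nil =>
    intro b k hk
    have hk0 : k = 0 := by simpa using hk
    subst hk0
    cases b <;> simp [lcpN]
  | cons x xs ih =>
    intro b k hk
    cases k with
    | zero => simp
    | succ k =>
      cases b with
      | nil => simp [lcpN, List.take_succ_cons]
      | cons y ys =>
        rw [List.take_succ_cons]
        rw [List.cons_prefix_cons]
        by_cases h : x = y
        · rw [show lcpN (x :: xs) (y :: ys) = lcpN xs ys + 1 from by simp [lcpN, h]]
          simp only [h, true_and]
          rw [ih ys k (by simpa using hk)]
          omega
        · simp [lcpN, h]

-- a foldl of max is < k iff everything folded is < k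
theorem foldl_max_lt {α : Type} (f : α → Nat) (k : Nat) :
    ∀ (l : List α) (a : Nat), (l.foldl (fun b x => max b (f x)) a < k ↔ a < k ∧ ∀ x ∈ l, f x < k) := by
  intro l
  induction l with
  | nil => intro a; simp
  | cons x xs ih =>
    intro a
    rw [List.foldl_cons, ih]
    simp only [List.mem_cons]
    constructor
    · rintro ⟨h1, h2⟩
      exact ⟨by omega, fun y hy => by rcases hy with rfl | hy; omega; exact h2 y hy⟩
    · rintro ⟨h1, h2⟩
      exact ⟨by have := h2 x (Or.inl rfl); omega, fun y hy => h2 y (Or.inr hy)⟩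

-- B's guarded inner fold is the fold over the pairs at other indices
theorem foldl_if_filter {β : Type} (i : Nat) (g : String × Nat → β) (m : β → β → β) :
    ∀ (l : List (String × Nat)) (a : β),
      l.foldl (fun b jv => if jv.2 ≠ i then m b (g jv) else b) a =
        (l.filter (fun q => !decide (q.2 = i))).foldl (fun b jv => m b (g jv)) a := by
  intro l
  induction l with
  | nil => intro a; simp
  | cons q l ih =>
    intro a
    simp only [List.foldl_cons, List.filter_cons]
    by_cases h : q.2 = i
    · rw [if_neg (fun hc => hc h), if_neg (by simp [h])]
      exact ih a
    · rw [if_pos h, if_pos (by simp [h]), List.foldl_cons]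
      exact ih (m a (g q))

-- the Int-valued inner fold of B computes the Nat-valued max fold
theorem foldl_max_int (w : String) (i : Nat) :
    ∀ (l : List (String × Nat)) (a : Nat),
      l.foldl (fun (b : Int) jv => if jv.2 ≠ i then max b (lcpI w.toList jv.1.toList) else b) (a : Int) =
        ((l.foldl (fun (b : Nat) jv => if jv.2 ≠ i then max b (lcpN w.toList jv.1.toList) else b) a : Nat) : Int) := by
  intro l
  induction l with
  | nil => intro a; simp
  | cons q l ih =>
    intro a
    simp only [List.foldl_cons]
    by_cases h : q.2 = i
    · rw [if_neg (fun hc => hc h), if_neg (fun hc => hc h)]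
      exact ih a
    · rw [if_pos h, if_pos h, lcpI_eq, ← Nat.cast_max]
      exact ih (max a (lcpN w.toList q.1.toList))

-- the pair (w, i) is the unique element of zipIdx at index i
theorem zipIdx_filter_eq (w : String) : ∀ (l : List String) (n i : Nat),
    (w, i) ∈ List.zipIdx l n →
      (List.zipIdx l n).filter (fun p => decide (p.2 = i)) = [(w, i)] := by
  intro l
  induction l with
  | nil => intro n i h; simp at h
  | cons a l ih =>
    intro n i h
    rw [List.zipIdx_cons] at h ⊢
    rcases List.mem_cons.mp h with heq | hmem
    · have hw : a = w ∧ n = i := by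
        have h1 := congrArg Prod.fst heq
        have h2 := congrArg Prod.snd heq
        simp at h1 h2
        exact ⟨h1.symm, h2.symm⟩
      rcases hw with ⟨rfl, rfl⟩
      rw [List.filter_cons, if_pos (by simp)]
      congr 1
      rw [List.filter_eq_nil_iff]
      intro q hq
      have := List.le_snd_of_mem_zipIdx hq
      simp only [decide_eq_true_eq]
      omega
    · have hlow := List.le_snd_of_mem_zipIdx hmem
      simp only at hlow
      rw [List.filter_cons, if_neg (by simp; omega)]
      exact ih (n + 1) i hmem

-- generic: a fold of (+ g x) is the sum of the mapped list
theorem foldl_add_eq_sum {α : Type} (g : α → Int) :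
    ∀ (l : List α) (t : Int), l.foldl (fun a x => a + g x) t = t + (l.map g).sum := by
  intro l
  induction l with
  | nil => intro t; simp
  | cons x l ih => intro t; simp [ih]; ring

-- A's per-word keystroke count, characterised as min |w| (M + 1)
theorem steps_min (cter : PySem.Dict (List Char) Int) (M : Nat) :
    ∀ (cs t : List Char), t.length ≤ M →
      (∀ k : Nat, 1 ≤ k → k ≤ cs.length → (cter.getD (t ++ cs.take k) 0 = 1 ↔ M < t.length + k)) →
      steps cter t cs = min cs.length (M + 1 - t.length) := by
  intro cs
  induction cs with
  | nil => intro t _ _; simp [steps]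
  | cons c cs ih =>
    intro t ht hyp
    have h1 := hyp 1 (le_refl 1) (by simp)
    simp only [List.take_succ_cons, List.take_zero] at h1
    by_cases hg : cter.getD (t ++ [c]) 0 = 1
    · have := h1.mp hg
      rw [steps, if_pos hg]
      simp only [List.length_cons]
      omega
    · have hM : t.length + 1 ≤ M := by
        by_contra hc
        exact hg (h1.mpr (by omega))
      rw [steps, if_neg hg]
      rw [ih (t ++ [c]) (by simp; omega) ?_]
      · simp only [List.length_cons, List.length_append, List.length_cons, List.length_nil]
        omega
      · intro k hk1 hk2
        have h2 := hyp (k + 1) (by omega) (by simp; omega)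
        simp only [List.take_succ_cons] at h2
        rw [List.append_assoc, List.singleton_append, h2]
        simp only [List.length_append, List.length_cons, List.length_nil]
        omega

-- the per-index equality between A's keystroke count and B's min formula
theorem per_index (words : List String) (w : String) (i : Nat)
    (hw : (w, i) ∈ words.zipIdx) :
    ((steps (words.foldl buildCounter PySem.Dict.empty) [] w.toList : Nat) : Int) =
      min (PySem.Str.len w)
        (words.zipIdx.foldl
          (fun best jv => if jv.2 ≠ i then max best (lcpI w.toList jv.1.toList) else best) 0 + 1) := by
  set cter := words.foldl buildCounter PySem.Dict.empty with hcter
  -- name the list of pairs at other indices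
  set others := words.zipIdx.filter (fun q => !decide (q.2 = i)) with hothers
  set M := others.foldl (fun (b : Nat) jv => max b (lcpN w.toList jv.1.toList)) 0 with hM
  -- B's inner fold is ↑M
  have hB : words.zipIdx.foldl
      (fun best jv => if jv.2 ≠ i then max best (lcpI w.toList jv.1.toList) else best) (0 : Int) = (M : Int) := by
    have := foldl_max_int w i words.zipIdx 0
    rw [Nat.cast_zero] at this
    rw [this, foldl_if_filter i (fun jv => lcpN w.toList jv.1.toList) max words.zipIdx 0]
  rw [hB]
  -- the counter value at each nonempty prefix of w
  have hcount : ∀ k : Nat, 1 ≤ k → k ≤ w.toList.length →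
      (cter.getD (w.toList.take k) 0 = 1 ↔ M < k) := by
    intro k hk1 hk2
    have hne : w.toList.take k ≠ [] := by
      intro hnil
      have h0 := congrArg List.length hnil
      rw [List.length_take] at h0
      simp only [List.length_nil] at h0
      omega
    rw [hcter, cter_getD (w.toList.take k) words PySem.Dict.empty, PySem.Dict.getD_empty, zero_add]
    -- rewrite countP over words as countP over zipIdx
    have hmapfst : words.zipIdx.map Prod.fst = words := List.zipIdx_map_fst 0 words
    have hsplit : words.countP (fun v => decide (w.toList.take k ≠ [] ∧ w.toList.take k <+: v.toList)) =
        1 + others.countP (fun q => decide (w.toList.take k <+: q.1.toList)) := by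
      have hcp : words.countP (fun v => decide (w.toList.take k ≠ [] ∧ w.toList.take k <+: v.toList)) =
          words.countP (fun v => decide (w.toList.take k <+: v.toList)) := by
        rw [List.countP_eq_length_filter, List.countP_eq_length_filter]
        congr 1
        apply List.filter_congr
        intro v _
        simp [hne]
      rw [hcp]
      have h1 : words.countP (fun v => decide (w.toList.take k <+: v.toList)) =
          words.zipIdx.countP (fun q => decide (w.toList.take k <+: q.1.toList)) := by
        conv_lhs => rw [← hmapfst]
        rw [List.countP_map]
        rfl
      rw [h1]
      have hperm : (words.zipIdx.filter (fun q => decide (q.2 = i)) ++ others).Perm words.zipIdx :=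
        List.filter_append_perm _ _
      rw [← (hperm.countP_congr (fun x _ => rfl) :
        (words.zipIdx.filter (fun q => decide (q.2 = i)) ++ others).countP
          (fun q => decide (w.toList.take k <+: q.1.toList)) = _)]
      rw [List.countP_append, zipIdx_filter_eq w words 0 i hw]
      have hself : w.toList.take k <+: w.toList := List.take_prefix k w.toList
      simp [hself]
    rw [hsplit]
    have hzero : others.countP (fun q => decide (w.toList.take k <+: q.1.toList)) = 0 ↔ M < k := by
      rw [List.countP_eq_zero]
      have hfold := foldl_max_lt (fun jv : String × Nat => lcpN w.toList jv.1.toList) k others 0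
      rw [hM]
      rw [hfold]
      constructor
      · intro h
        refine ⟨by omega, fun q hq => ?_⟩
        have hq2 := h q hq
        simp only [decide_eq_true_eq] at hq2
        rw [take_prefix_iff_lcpN w.toList q.1.toList k hk2] at hq2
        omega
      · rintro ⟨_, h⟩ q hq
        have hq2 := h q hq
        simp only [decide_eq_true_eq]
        rw [take_prefix_iff_lcpN w.toList q.1.toList k hk2]
        omega
    rw [← hzero]
    constructor
    · intro h
      have : (1 + others.countP (fun q => decide (w.toList.take k <+: q.1.toList)) : Int) = 1 := h
      omega
    · intro h
      rw [h]
      simp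
  -- conclude via steps_min (nonempty) or directly (empty word)
  cases hcs : w.toList with
  | nil =>
    have hlen : PySem.Str.len w = 0 := by simp [PySem.Str.len_eq, hcs]
    rw [hlen]
    simp only [steps, Nat.cast_zero]
    omega
  | cons c cs =>
    rw [← hcs]
    rw [steps_min cter M w.toList [] (by simp) (by simpa using hcount)]
    rw [PySem.Str.len_eq]
    simp only [List.length_nil, Nat.sub_zero]
    have : 0 < w.toList.length := by rw [hcs]; simp
    rcases le_or_gt (M + 1) w.toList.length with hle | hgt
    · rw [min_eq_right hle, min_eq_right (by omega)]
      push_cast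
      ring
    · rw [min_eq_left (by omega), min_eq_left (by omega)]

-- map over words equals map over zipIdx of the first components
theorem map_eq_map_zipIdx {β : Type} (l : List String) (F : String → β) :
    l.map F = l.zipIdx.map (fun p => F p.1) := by
  conv_lhs => rw [← List.zipIdx_map_fst 0 l]
  rw [List.map_map]
  rfl

-- ===== VERDICT (by name: the statement is the Claim_ definition above) =====
theorem solution_spec : Claim_equal_solution := by
  intro words _
  unfold Spec_solution solution solution_alt
  set cter := words.foldl buildCounter PySem.Dict.empty with hcter
  -- A's second fold as a sum
  have hA : words.foldl (fun answer word => typeLoop cter [] answer word.toList) 0 =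
      (words.map (fun w => ((steps cter [] w.toList : Nat) : Int))).sum := by
    have : ∀ (l : List String) (t : Int),
        l.foldl (fun answer word => typeLoop cter [] answer word.toList) t =
          l.foldl (fun a w => a + ((steps cter [] w.toList : Nat) : Int)) t := by
      intro l
      induction l with
      | nil => intro t; rfl
      | cons x l ih => intro t; simp only [List.foldl_cons, typeLoop_eq_steps]
    rw [this, foldl_add_eq_sum, zero_add]
  rw [hA]
  rw [show (words.zipIdx.foldl
      (fun total iw =>
        let best := words.zipIdx.foldl
          (fun best jv => if jv.2 ≠ iw.2 then max best (lcpI iw.1.toList jv.1.toList) else best) 0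
        total + min (PySem.Str.len iw.1) (best + 1)) 0) =
      (words.zipIdx.map (fun iw => min (PySem.Str.len iw.1)
        (words.zipIdx.foldl
          (fun best jv => if jv.2 ≠ iw.2 then max best (lcpI iw.1.toList jv.1.toList) else best) 0 + 1))).sum
    from by rw [foldl_add_eq_sum]; ring_nf]
  rw [map_eq_map_zipIdx]
  congr 1
  apply List.map_eq_map_iff.mpr
  intro p hp
  exact per_index words p.1 p.2 (by rwa [← Prod.mk.eta (p := p)] at hp)
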